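-- pv_equiv track=rewrite | github.com/mistermonke26/practice-log | pi-scanner/session.py | parse_payload
-- ===== SOURCE A (Python) =====
-- def parse_payload(raw: str) -> tuple[str | None, str | None]:
--     """
--     Parse a QR payload into (user_name, instrument_name).
--
--     Supported formats:
--         user:jasmin|instrument:piano   →  ('jasmin', 'piano')
--         user:jasmin                    →  ('jasmin', None)   ← uses station default
--         jasmin                         →  ('jasmin', None)   ← fallback for plain name
--     """
--     user_name = None
--     instrument_name = None
--
--     parts = raw.strip().split("|")
--     for part in parts:
--         if ":" in part:
--             key, _, val = part.partition(":")
--             key = key.strip().lower()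
--             val = val.strip()
--             if key == "user":
--                 user_name = val
--             elif key == "instrument":
--                 instrument_name = val
--         else:
--             # plain string → treat as user name
--             if user_name is None:
--                 user_name = part.strip()
--
--     return user_name, instrument_name
-- ===== SOURCE B (Python) =====
-- def parse_payload(raw: str) -> tuple[str | None, str | None]:
--     # Declarative re-decomposition: collect all keyed (key, value) pairs once,
--     # then resolve each name as the LAST keyed occurrence; a plain token only
--     # backs up 'user' when no keyed user entry appears anywhere (first plain wins).
--     parts = raw.strip().split("|")
--     keyed = [(p.partition(":")[0].strip().lower(), p.partition(":")[2].strip())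
--              for p in parts if ":" in p]
--     user = next((v for k, v in reversed(keyed) if k == "user"), None)
--     instrument = next((v for k, v in reversed(keyed) if k == "instrument"), None)
--     if user is None:
--         user = next((p.strip() for p in parts if ":" not in p), None)
--     return user, instrument
-- ===== Notes on version B (the rewrite author's own statement) =====
-- stated objective: simpler
-- what changed: Replaces A's stateful loop over two mutable variables and branch-priority updates by a declarative decomposition: collect all keyed (key, value) pairs in one comprehension, resolve each name as the last keyed occurrence via reversed next(), and fall back to the first plain token only when no keyed user entry exists.
import Mathlib
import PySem

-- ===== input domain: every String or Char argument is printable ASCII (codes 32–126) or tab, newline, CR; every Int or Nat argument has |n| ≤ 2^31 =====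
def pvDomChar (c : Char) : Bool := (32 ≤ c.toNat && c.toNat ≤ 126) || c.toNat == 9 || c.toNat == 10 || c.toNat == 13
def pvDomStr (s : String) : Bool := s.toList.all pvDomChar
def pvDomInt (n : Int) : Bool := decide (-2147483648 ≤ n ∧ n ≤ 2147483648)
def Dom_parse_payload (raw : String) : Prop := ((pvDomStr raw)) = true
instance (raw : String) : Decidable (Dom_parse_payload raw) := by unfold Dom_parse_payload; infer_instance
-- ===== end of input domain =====

-- B replaces A's stateful two-variable loop by a declarative decomposition (collect the keyed pairs
-- once, resolve each name as the last keyed occurrence, first plain token as fallback); objective: simpler.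

-- ===== PORT A =====
-- hand port of `p.partition(":")` (PySem has no partition): (text before first ':', text after it);
-- exact whenever ':' occurs in p, and both Pythons only use it in that branch
def pvPartAt (p : List Char) : List Char × List Char :=
  (p.takeWhile (fun c => !(c == ':')), (p.dropWhile (fun c => !(c == ':'))).drop 1)

-- the body of A's `for part in parts` loop, state = (user_name, instrument_name)
def pvStepA (st : Option (List Char) × Option (List Char)) (part : List Char) :
    Option (List Char) × Option (List Char) :=
  if PySem.Chars.isIn [':'] part then
    let key := PySem.Chars.lower (PySem.Chars.strip (pvPartAt part).1)
    let val := PySem.Chars.strip (pvPartAt part).2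
    if key == "user".toList then (some val, st.2)
    else if key == "instrument".toList then (st.1, some val)
    else st
  else
    match st.1 with
    | none => (some (PySem.Chars.strip part), st.2)
    | some _ => st

def parse_payload (raw : String) : Option String × Option String :=
  let parts := PySem.Chars.splitOn (PySem.Chars.strip raw.toList) ['|']
  let st := parts.foldl pvStepA (none, none)
  (st.1.map String.ofList, st.2.map String.ofList)

-- ===== PORT B =====
-- key/value of p.partition(":") as Source B computes them
def pvKeyOf (p : List Char) : List Char := PySem.Chars.lower (PySem.Chars.strip (pvPartAt p).1)
def pvValOf (p : List Char) : List Char := PySem.Chars.strip (pvPartAt p).2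

def parse_payload_alt (raw : String) : Option String × Option String :=
  let parts := PySem.Chars.splitOn (PySem.Chars.strip raw.toList) ['|']
  let keyed := (parts.filter (fun p => PySem.Chars.isIn [':'] p)).map (fun p => (pvKeyOf p, pvValOf p))
  -- next((v for k, v in reversed(keyed) if k == …), None)
  let user0 := (keyed.reverse.find? (fun kv => kv.1 == "user".toList)).map (·.2)
  let instrument := (keyed.reverse.find? (fun kv => kv.1 == "instrument".toList)).map (·.2)
  let user := match user0 with
    | some v => some v
    | none => (parts.find? (fun p => !(PySem.Chars.isIn [':'] p))).map PySem.Chars.strip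
  (user.map String.ofList, instrument.map String.ofList)

-- ===== PRECONDITION & SPEC =====
def Spec_parse_payload (raw : String) (out : Option String × Option String) : Prop := out = parse_payload_alt raw
instance (raw : String) (out : Option String × Option String) : Decidable (Spec_parse_payload raw out) := by unfold Spec_parse_payload; infer_instance

-- ===== CLAIM (what is proved, stated in full; the proofs are below) =====
def Claim_equal_parse_payload : Prop := ∀ (raw : String), Dom_parse_payload raw → Spec_parse_payload raw (parse_payload raw)

-- ===== LEMMAS AND PROOFS =====

-- B's three resolutions, as functions of the part list
def pvKeyed (parts : List (List Char)) : List (List Char × List Char) :=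
  (parts.filter (fun p => PySem.Chars.isIn [':'] p)).map (fun p => (pvKeyOf p, pvValOf p))

def pvLast (key : List Char) (parts : List (List Char)) : Option (List Char) :=
  ((pvKeyed parts).reverse.find? (fun kv => kv.1 == key)).map (·.2)

def pvFirstPlain (parts : List (List Char)) : Option (List Char) :=
  (parts.find? (fun p => !(PySem.Chars.isIn [':'] p))).map PySem.Chars.strip

-- loop invariant: A's fold from any state equals B's resolutions merged over that state
theorem pvFoldA (parts : List (List Char)) (u i : Option (List Char)) :
    parts.foldl pvStepA (u, i) =
      ( (pvLast "user".toList parts).or (u.or (pvFirstPlain parts)),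
        (pvLast "instrument".toList parts).or i ) := by
  induction parts generalizing u i with
  | nil => simp [pvLast, pvKeyed, pvFirstPlain]
  | cons p rest ih =>
    by_cases hc : PySem.Chars.isIn [':'] p = true
    · have hk : ∀ key, pvLast key (p :: rest) =
          (pvLast key rest).or (if (pvKeyOf p == key) = true then some (pvValOf p) else none) := by
        intro key
        simp only [pvLast, pvKeyed, List.filter_cons, hc, if_true, List.map_cons,
          List.reverse_cons, List.find?_append]
        cases h : (((rest.filter (fun p => PySem.Chars.isIn [':'] p)).map
            (fun p => (pvKeyOf p, pvValOf p))).reverse.find? (fun kv => kv.1 == key)) <;>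
          by_cases hkey : (pvKeyOf p == key) = true <;>
          simp [hkey, List.find?, Option.or]
      have hfp : pvFirstPlain (p :: rest) = pvFirstPlain rest := by
        simp [pvFirstPlain, List.find?, hc]
      rw [List.foldl_cons]
      simp only [pvStepA, hc, if_true]
      simp only [show PySem.Chars.lower (PySem.Chars.strip (pvPartAt p).1) = pvKeyOf p from rfl,
        show PySem.Chars.strip (pvPartAt p).2 = pvValOf p from rfl]
      by_cases hu : (pvKeyOf p == "user".toList) = true
      · have hi : (pvKeyOf p == "instrument".toList) = false := by
          rw [show pvKeyOf p = "user".toList from eq_of_beq hu]; rfl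
        simp only [hu, hi, if_true]
        rw [ih, hk, hk, hfp]
        simp only [hu, hi]
        cases pvLast "user".toList rest <;> cases pvLast "instrument".toList rest <;>
          simp [Option.or]
      · by_cases hi : (pvKeyOf p == "instrument".toList) = true
        · simp only [hu, hi, if_true, if_false, Bool.false_eq_true]
          rw [ih, hk, hk, hfp]
          simp only [hu, hi]
          cases pvLast "user".toList rest <;> cases pvLast "instrument".toList rest <;>
            simp [Option.or]
        · simp only [eq_false_of_ne_true hu, eq_false_of_ne_true hi, if_false, Bool.false_eq_true]
          rw [ih, hk, hk, hfp]
          simp only [eq_false_of_ne_true hu, eq_false_of_ne_true hi]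
          simp
    · have hk : ∀ key, pvLast key (p :: rest) = pvLast key rest := by
        intro key; simp [pvLast, pvKeyed, hc]
      have hfp : pvFirstPlain (p :: rest) = some (PySem.Chars.strip p) := by
        simp [pvFirstPlain, List.find?, hc]
      rw [List.foldl_cons]
      cases u with
      | none =>
        simp only [pvStepA, hc, if_false, Bool.false_eq_true]
        rw [ih, hk, hk, hfp]
        cases pvFirstPlain rest <;> simp [Option.or]
      | some x =>
        simp only [pvStepA, hc, if_false, Bool.false_eq_true]
        rw [ih, hk, hk, hfp]
        simp [Option.or]

-- ===== VERDICT (by name: the statement is the Claim_ definition above) =====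
theorem parse_payload_spec : Claim_equal_parse_payload := by
  intro raw _
  unfold Spec_parse_payload parse_payload parse_payload_alt
  simp only [pvFoldA]
  refine Prod.ext ?_ ?_
  · cases h : ((pvKeyed (PySem.Chars.splitOn (PySem.Chars.strip raw.toList) ['|'])).reverse.find?
        (fun kv => kv.1 == ['u', 's', 'e', 'r'])) with
    | none => simp only [pvKeyed] at h; simp [pvLast, pvKeyed, pvFirstPlain, h, Option.or]
    | some kv => simp only [pvKeyed] at h; simp [pvLast, pvKeyed, pvFirstPlain, h, Option.or]
  · cases h : ((pvKeyed (PySem.Chars.splitOn (PySem.Chars.strip raw.toList) ['|'])).reverse.find?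
        (fun kv => kv.1 == ['i', 'n', 's', 't', 'r', 'u', 'm', 'e', 'n', 't'])) with
    | none => simp only [pvKeyed] at h; simp [pvLast, pvKeyed, h, Option.or]
    | some kv => simp only [pvKeyed] at h; simp [pvLast, pvKeyed, h, Option.or]
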